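-- pv_equiv track=rewrite | github.com/dahlia1209/WebMajiang-server | majiang_core/xiangting.py | dazi
-- ===== SOURCE A (Python) =====
-- from typing import List, Dict, Union, Optional,Tuple,Callable
--
-- def dazi(bingpai: List[int]) -> Tuple[List[int], List[int]]:
--     n_pai = 0
--     n_dazi = 0
--     n_guli = 0
--
--     for n in range(1, 10):
--         n_pai += bingpai[n]
--         if n <= 7 and bingpai[n + 1] == 0 and bingpai[n + 2] == 0:
--             n_dazi += n_pai // 2
--             n_guli += n_pai % 2
--             n_pai = 0
--
--     n_dazi += n_pai // 2
--     n_guli += n_pai % 2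
--
--     return [0, n_dazi, n_guli], [0, n_dazi, n_guli]
-- ===== SOURCE B (Python) =====
-- def dazi(bingpai):
--     # The answer only depends on the total tile count and on how many of the
--     # double-zero-delimited blocks hold an odd number of tiles: each block of t
--     # tiles yields t // 2 dazi and t % 2 guli, and summing t = 2*(t//2) + t%2
--     # over blocks gives  total = 2 * n_dazi + n_guli.  So track only a parity
--     # bit recursively, count odd blocks, and derive n_dazi arithmetically.
--     total = sum(bingpai[1:10])
--
--     def odd_blocks(n, parity):
--         # number of odd-total blocks among positions n..9, given the parity of
--         # the current (open) block so far
--         if n > 9: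
--             return parity
--         parity = (parity + bingpai[n]) % 2
--         if n <= 7 and bingpai[n + 1] == 0 and bingpai[n + 2] == 0:
--             return parity + odd_blocks(n + 1, 0)
--         return odd_blocks(n + 1, parity)
--
--     n_guli = odd_blocks(1, 0)
--     n_dazi = (total - n_guli) // 2
--     res = [0, n_dazi, n_guli]
--     return res, res
-- ===== Notes on version B (the rewrite author's own statement) =====
-- stated objective: alternative
-- what changed: A accumulates //2 and %2 of every block total inside one loop; B never forms block totals: a recursive scan carries only a parity bit to count odd blocks (n_guli), sums bingpai[1:10] once, and derives n_dazi arithmetically as (total - n_guli)//2 from the identity total = 2*n_dazi + n_guli.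
import Mathlib
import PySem

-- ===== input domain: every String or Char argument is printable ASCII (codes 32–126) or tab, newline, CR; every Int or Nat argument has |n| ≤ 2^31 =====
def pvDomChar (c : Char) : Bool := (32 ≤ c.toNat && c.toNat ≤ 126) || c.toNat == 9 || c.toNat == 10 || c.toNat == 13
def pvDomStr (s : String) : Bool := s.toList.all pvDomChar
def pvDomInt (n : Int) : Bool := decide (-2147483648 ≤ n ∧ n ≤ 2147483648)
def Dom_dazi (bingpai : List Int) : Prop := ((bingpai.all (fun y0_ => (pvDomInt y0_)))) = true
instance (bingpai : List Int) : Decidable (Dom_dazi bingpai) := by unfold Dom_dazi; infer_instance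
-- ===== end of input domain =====

-- B drops A's per-block //2 and %2 accumulation: it counts odd blocks with a recursive
-- parity scan and derives n_dazi from the total tile count; objective: alternative, not speed.

-- ===== PORT A =====
-- loop body of A's 'for n in range(1, 10)'
def fA (bingpai : List Int) (st : Int × Int × Int) (n : Int) : Int × Int × Int :=
  let n_pai := st.1 + PySem.List.pyGetD bingpai n 0
  if n ≤ 7 ∧ PySem.List.pyGetD bingpai (n + 1) 0 = 0 ∧ PySem.List.pyGetD bingpai (n + 2) 0 = 0 then
    ((0 : Int), st.2.1 + PySem.Int.floordiv n_pai 2, st.2.2 + PySem.Int.mod n_pai 2)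
  else (n_pai, st.2.1, st.2.2)

def dazi (bingpai : List Int) : List Int × List Int :=
  let s := (PySem.List.pyRange 1 10 1).foldl (fA bingpai) (0, 0, 0)
  let n_dazi := s.2.1 + PySem.Int.floordiv s.1 2
  let n_guli := s.2.2 + PySem.Int.mod s.1 2
  ([0, n_dazi, n_guli], [0, n_dazi, n_guli])

-- ===== PORT B =====
-- Source B's recursive helper 'odd_blocks(n, parity)'; recursion on n exactly as in Python
def oddBlocks (bingpai : List Int) (n : Nat) (parity : Int) : Int :=
  if 9 < n then parity
  else
    let parity := PySem.Int.mod (parity + PySem.List.pyGetD bingpai (n : Int) 0) 2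
    if n ≤ 7 ∧ PySem.List.pyGetD bingpai ((n : Int) + 1) 0 = 0 ∧ PySem.List.pyGetD bingpai ((n : Int) + 2) 0 = 0 then
      parity + oddBlocks bingpai (n + 1) 0
    else oddBlocks bingpai (n + 1) parity
termination_by 10 - n

def dazi_alt (bingpai : List Int) : List Int × List Int :=
  let total := (PySem.List.slice bingpai (some 1) (some 10)).sum
  let n_guli := oddBlocks bingpai 1 0
  let n_dazi := PySem.Int.floordiv (total - n_guli) 2
  ([0, n_dazi, n_guli], [0, n_dazi, n_guli])

-- ===== PRECONDITION & SPEC =====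
-- A indexes positions 1 through 9 and raises IndexError on lists shorter than 10; Pre_ excludes exactly those.
def Pre_dazi (bingpai : List Int) : Prop := 10 ≤ bingpai.length
instance (bingpai : List Int) : Decidable (Pre_dazi bingpai) := by unfold Pre_dazi; infer_instance
def pvWitness_dazi : List Int := [0, 1, 1, 0, 0, 2, 0, 1, 0, 3]

def Spec_dazi (bingpai : List Int) (out : List Int × List Int) : Prop := out = dazi_alt bingpai
instance (bingpai : List Int) (out : List Int × List Int) : Decidable (Spec_dazi bingpai out) := by unfold Spec_dazi; infer_instance

-- ===== CLAIM (what is proved, stated in full; the proofs are below) =====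
def Claim_equal_dazi : Prop := ∀ (bingpai : List Int), Dom_dazi bingpai → Pre_dazi bingpai → Spec_dazi bingpai (dazi bingpai)

-- ===== LEMMAS AND PROOFS =====

-- Invariant tying A's loop state (n_pai, n_dazi, n_guli) over positions n..9 to B's
-- parity recursion: (1) final guli agrees with the odd-block count, (2) the processed
-- tiles are conserved as 2*n_dazi + n_guli + n_pai.
theorem dazi_key (bp : List Int) : ∀ (k n : Nat), n + k = 10 → 1 ≤ n → ∀ (p d g : Int),
    (((PySem.List.pyRange (n : Int) 10).foldl (fA bp) (p, d, g)).2.2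
        + PySem.Int.mod ((PySem.List.pyRange (n : Int) 10).foldl (fA bp) (p, d, g)).1 2
      = g + oddBlocks bp n (PySem.Int.mod p 2))
    ∧ (2 * ((PySem.List.pyRange (n : Int) 10).foldl (fA bp) (p, d, g)).2.1
        + ((PySem.List.pyRange (n : Int) 10).foldl (fA bp) (p, d, g)).2.2
        + ((PySem.List.pyRange (n : Int) 10).foldl (fA bp) (p, d, g)).1
      = 2 * d + g + p
        + ((PySem.List.pyRange (n : Int) 10).map (fun i => PySem.List.pyGetD bp i 0)).sum) := by
  intro k
  induction k with
  | zero =>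
    intro n hn _ p d g
    have hn10 : n = 10 := by omega
    subst hn10
    have hr : PySem.List.pyRange ((10 : Nat) : Int) 10 = [] := by decide
    rw [hr]
    rw [oddBlocks]
    simp only [show (9 < 10) = True by simp, if_true, List.foldl_nil, List.map_nil, List.sum_nil]
    exact ⟨trivial, by omega⟩
  | succ k ih =>
    intro n hn h1 p d g
    have hlt : ((n : Nat) : Int) < 10 := by omega
    rw [PySem.List.pyRange_one_cons hlt]
    simp only [List.foldl_cons, List.map_cons, List.sum_cons]
    rw [oddBlocks, if_neg (show ¬ 9 < n by omega)]
    simp only []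
    set x := PySem.List.pyGetD bp ((n : Nat) : Int) 0 with hx
    have e2 : ∀ a : Int, PySem.Int.mod a 2 = a % 2 :=
      fun a => PySem.Int.mod_eq_emod_of_pos (by norm_num)
    have d2 : ∀ a : Int, PySem.Int.floordiv a 2 = a / 2 :=
      fun a => PySem.Int.floordiv_eq_ediv_of_pos (by norm_num)
    by_cases hc : n ≤ 7 ∧ PySem.List.pyGetD bp (((n : Nat) : Int) + 1) 0 = 0
        ∧ PySem.List.pyGetD bp (((n : Nat) : Int) + 2) 0 = 0
    · rw [if_pos hc]
      have hcA : ((n : Nat) : Int) ≤ 7 ∧ PySem.List.pyGetD bp (((n : Nat) : Int) + 1) 0 = 0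
          ∧ PySem.List.pyGetD bp (((n : Nat) : Int) + 2) 0 = 0 :=
        ⟨by omega, hc.2.1, hc.2.2⟩
      simp only [fA, if_pos hcA]
      obtain ⟨ih1, ih2⟩ := ih (n + 1) (by omega) (by omega)
        0 (d + PySem.Int.floordiv (p + x) 2) (g + PySem.Int.mod (p + x) 2)
      push_cast at ih1 ih2 ⊢
      rw [ih1, ih2]
      have hz : PySem.Int.mod (0 : Int) 2 = 0 := by decide
      rw [hz]
      have hpar : PySem.Int.mod (PySem.Int.mod p 2 + x) 2 = PySem.Int.mod (p + x) 2 := by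
        rw [e2, e2, e2]; omega
      rw [hpar]
      constructor
      · ring
      · rw [d2, e2]; ring_nf; omega
    · rw [if_neg hc]
      have hcA : ¬ (((n : Nat) : Int) ≤ 7 ∧ PySem.List.pyGetD bp (((n : Nat) : Int) + 1) 0 = 0
          ∧ PySem.List.pyGetD bp (((n : Nat) : Int) + 2) 0 = 0) := by
        intro h; exact hc ⟨by omega, h.2.1, h.2.2⟩
      simp only [fA, if_neg hcA]
      obtain ⟨ih1, ih2⟩ := ih (n + 1) (by omega) (by omega) (p + x) d g
      push_cast at ih1 ih2 ⊢
      rw [ih1, ih2]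
      have hpar : PySem.Int.mod (PySem.Int.mod p 2 + x) 2 = PySem.Int.mod (p + x) 2 := by
        rw [e2, e2, e2]; omega
      rw [hpar]
      constructor
      · ring
      · ring

theorem dazi_main (b0 b1 b2 b3 b4 b5 b6 b7 b8 b9 : Int) (rest : List Int) :
    dazi (b0 :: b1 :: b2 :: b3 :: b4 :: b5 :: b6 :: b7 :: b8 :: b9 :: rest)
      = dazi_alt (b0 :: b1 :: b2 :: b3 :: b4 :: b5 :: b6 :: b7 :: b8 :: b9 :: rest) := by
  obtain ⟨h1, h2⟩ := dazi_key (b0 :: b1 :: b2 :: b3 :: b4 :: b5 :: b6 :: b7 :: b8 :: b9 :: rest)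
    9 1 (by norm_num) (by norm_num) 0 0 0
  push_cast at h1 h2
  have hz : PySem.Int.mod (0 : Int) 2 = 0 := by decide
  rw [hz] at h1
  have hsl : PySem.List.slice (b0 :: b1 :: b2 :: b3 :: b4 :: b5 :: b6 :: b7 :: b8 :: b9 :: rest)
      (some 1) (some 10) = [b1,b2,b3,b4,b5,b6,b7,b8,b9] := by
    rw [show ((1:Int)) = ((1:Nat):Int) by norm_num, show ((10:Int)) = ((10:Nat):Int) by norm_num,
      PySem.List.slice_natCast]
    rfl
  have hvals : ((PySem.List.pyRange 1 10).map
        (fun i => PySem.List.pyGetD (b0::b1::b2::b3::b4::b5::b6::b7::b8::b9::rest) i 0))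
      = [b1,b2,b3,b4,b5,b6,b7,b8,b9] := by
    rw [show PySem.List.pyRange (1:Int) 10 = [1,2,3,4,5,6,7,8,9] from by decide]
    norm_num [PySem.List.pyGetD_ofNat']
  rw [hvals] at h2
  simp only [dazi, dazi_alt, hsl]
  simp only [List.sum_cons, List.sum_nil] at h2 ⊢
  have e2 : ∀ a : Int, PySem.Int.mod a 2 = a % 2 :=
    fun a => PySem.Int.mod_eq_emod_of_pos (by norm_num)
  have d2 : ∀ a : Int, PySem.Int.floordiv a 2 = a / 2 :=
    fun a => PySem.Int.floordiv_eq_ediv_of_pos (by norm_num)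
  rw [e2, d2, d2] at *
  simp only [Prod.mk.injEq, List.cons.injEq, and_true, true_and]
  constructor
  · constructor <;> [omega; omega]
  · constructor <;> [omega; omega]

-- ===== VERDICT (by name: the statement is the Claim_ definition above) =====
theorem dazi_spec : Claim_equal_dazi := by
  intro bingpai _ hpre
  unfold Pre_dazi at hpre
  unfold Spec_dazi
  rcases bingpai with _ | ⟨b0, _ | ⟨b1, _ | ⟨b2, _ | ⟨b3, _ | ⟨b4, _ | ⟨b5, _ | ⟨b6, _ | ⟨b7, _ | ⟨b8, _ | ⟨b9, rest⟩⟩⟩⟩⟩⟩⟩⟩⟩⟩ <;>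
    first
      | exact dazi_main b0 b1 b2 b3 b4 b5 b6 b7 b8 b9 rest
      | simp at hpre
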